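-- pv_equiv track=rewrite | github.com/etoy22/Tile-Placement | helper.py | el_calc
-- ===== SOURCE A (Python) =====
-- def el_calc(area,side1,side2):
--     '''
--     Calculates the values that will be visible as a result of an el calculation
--
--     Input:
--     - side1 (int): Refers to which side we are looking at Left: 0 or Right: 1
--     - side2 (int): Refers to which side we are looking at Top: 0 or Bottom: 2
--     - area (array): the 4x4 that will be affected
--
--     Returns:
--     - value (array): Counts which will be visible
--     '''
--     calc = [0,0,0,0]
--     start = 0
--     end = len(area)
--
--     startS = 0
--     endS = len(area)
--
--
--     if (side1 == 0):
--         startS += 1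
--     else:
--         endS -= 1
--
--     if (side2 == 0):
--         start += 1
--     else:
--         end -= 1
--
--
--     for i in range (start,end):
--         calc[0] += area[i][startS:endS].count(1)
--         calc[1] += area[i][startS:endS].count(2)
--         calc[2] += area[i][startS:endS].count(3)
--         calc[3] += area[i][startS:endS].count(4)
--
--     return calc
-- ===== SOURCE B (Python) =====
-- def el_calc(area, side1, side2):
--     n = len(area)
--     lo_r, hi_r = (1, n) if side2 == 0 else (0, n - 1)
--     lo_c, hi_c = (1, n) if side1 == 0 else (0, n - 1)
--     calc = [0, 0, 0, 0]
--     for i, row in enumerate(area):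
--         if lo_r <= i < hi_r:
--             for j, v in enumerate(row):
--                 if lo_c <= j < hi_c and 1 <= v <= 4:
--                     calc[v - 1] += 1
--     return calc
-- ===== Notes on version B (the rewrite author's own statement) =====
-- stated objective: alternative
-- what changed: Instead of ranging over the trimmed row indices and running four .count scans on a slice of each selected row, B scans the whole grid once with enumerate, filters each cell by its (row, column) index against the rectangle bounds, and tallies values 1-4 into calc[v-1]; no slicing, no range(), no .count.
import Mathlib
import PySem

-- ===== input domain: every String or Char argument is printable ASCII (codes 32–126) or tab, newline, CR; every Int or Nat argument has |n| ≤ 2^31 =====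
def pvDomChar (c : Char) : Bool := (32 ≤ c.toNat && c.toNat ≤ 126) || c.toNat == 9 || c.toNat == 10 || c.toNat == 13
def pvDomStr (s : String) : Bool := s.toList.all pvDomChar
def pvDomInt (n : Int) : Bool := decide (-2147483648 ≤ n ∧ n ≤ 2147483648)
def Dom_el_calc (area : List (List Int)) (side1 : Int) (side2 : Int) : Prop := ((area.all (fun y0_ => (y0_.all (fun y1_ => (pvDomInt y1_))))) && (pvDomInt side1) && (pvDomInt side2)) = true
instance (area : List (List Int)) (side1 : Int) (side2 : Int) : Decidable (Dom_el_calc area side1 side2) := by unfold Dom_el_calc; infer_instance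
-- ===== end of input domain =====

-- B replaces A's range-over-trimmed-rows + four .count scans over a slice of each row
-- by ONE enumerate scan of the whole grid that filters every cell by its (row, column)
-- index against the rectangle bounds and tallies values 1-4; same return value.

-- ===== PORT A =====
-- A's loop body: calc[k] += row[startS:endS].count(k+1) for k = 0..3 (calc kept as a 4-tuple; row = area[i])
def el_calc_row (startS endS : Int) (c : Int × Int × Int × Int) (row : List Int) : Int × Int × Int × Int :=
  (c.1 + ((PySem.List.slice row (some startS) (some endS)).count 1 : Nat),
   c.2.1 + ((PySem.List.slice row (some startS) (some endS)).count 2 : Nat),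
   c.2.2.1 + ((PySem.List.slice row (some startS) (some endS)).count 3 : Nat),
   c.2.2.2 + ((PySem.List.slice row (some startS) (some endS)).count 4 : Nat))

def el_calc (area : List (List Int)) (side1 : Int) (side2 : Int) : List Int :=
  let n : Int := area.length
  let startS : Int := if side1 == 0 then 0 + 1 else 0
  let endS : Int := if side1 == 0 then n else n - 1
  let start : Int := if side2 == 0 then 0 + 1 else 0
  let stop : Int := if side2 == 0 then n else n - 1
  let c := (PySem.List.pyRange start stop 1).foldl
    (fun c i => el_calc_row startS endS c (PySem.List.pyGetD area i [])) (0, 0, 0, 0)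
  [c.1, c.2.1, c.2.2.1, c.2.2.2]

-- ===== PORT B =====
-- B's inner-loop body: if lo_c <= j < hi_c and 1 <= v <= 4 then calc[v-1] += 1
def el_calc_alt_cell (loC hiC : Int) (cal : List Int) (jv : Int × Int) : List Int :=
  if (loC ≤ jv.1 ∧ jv.1 < hiC) ∧ (1 ≤ jv.2 ∧ jv.2 ≤ 4) then
    cal.set (jv.2 - 1).toNat (cal.getD (jv.2 - 1).toNat 0 + 1)
  else cal

def el_calc_alt (area : List (List Int)) (side1 : Int) (side2 : Int) : List Int :=
  let n : Int := area.length
  let rB : Int × Int := if side2 == 0 then (1, n) else (0, n - 1)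
  let cB : Int × Int := if side1 == 0 then (1, n) else (0, n - 1)
  (PySem.List.enumerate area 0).foldl
    (fun cal p => if rB.1 ≤ p.1 ∧ p.1 < rB.2
      then (PySem.List.enumerate p.2 0).foldl (el_calc_alt_cell cB.1 cB.2) cal
      else cal)
    [0, 0, 0, 0]

-- ===== PRECONDITION & SPEC =====
def Spec_el_calc (area : List (List Int)) (side1 : Int) (side2 : Int) (out : List Int) : Prop := out = el_calc_alt area side1 side2
instance (area : List (List Int)) (side1 : Int) (side2 : Int) (out : List Int) : Decidable (Spec_el_calc area side1 side2 out) := by unfold Spec_el_calc; infer_instance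

-- ===== CLAIM (what is proved, stated in full; the proofs are below) =====
def Claim_equal_el_calc : Prop := ∀ (area : List (List Int)) (side1 : Int) (side2 : Int), Dom_el_calc area side1 side2 → Spec_el_calc area side1 side2 (el_calc area side1 side2)

-- ===== LEMMAS AND PROOFS =====

-- proof-side tally on a bare value (B's increment once the index test has passed)
def tallyV (cal : List Int) (v : Int) : List Int :=
  if 1 ≤ v ∧ v ≤ 4 then cal.set (v - 1).toNat (cal.getD (v - 1).toNat 0 + 1) else cal

theorem cell_eq (loC hiC : Int) (cal : List Int) (jv : Int × Int) :
    el_calc_alt_cell loC hiC cal jv =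
      if loC ≤ jv.1 ∧ jv.1 < hiC then tallyV cal jv.2 else cal := by
  unfold el_calc_alt_cell tallyV
  by_cases h1 : loC ≤ jv.1 ∧ jv.1 < hiC <;> by_cases h2 : 1 ≤ jv.2 ∧ jv.2 ≤ 4 <;>
    simp [h1, h2]

-- an enumerate-and-filter-by-index fold is a fold over the drop/take segment
theorem foldl_enum_filter {α β : Type} (g : β → α → β) (lo hi : Int) (hlo : 0 ≤ lo)
    (xs : List α) : ∀ (s : Nat) (acc : β),
    (PySem.List.enumerate xs (s : Int)).foldl
        (fun acc p => if lo ≤ p.1 ∧ p.1 < hi then g acc p.2 else acc) acc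
      = ((xs.drop (lo.toNat - s)).take (hi.toNat - max lo.toNat s)).foldl g acc := by
  induction xs with
  | nil => intro s acc; simp [PySem.List.enumerate_nil]
  | cons x t ih =>
    intro s acc
    rw [PySem.List.enumerate_cons]
    have hc : ((s : Int) + 1) = ((s + 1 : Nat) : Int) := by push_cast; ring
    simp only [List.foldl_cons, hc]
    by_cases h1 : lo ≤ (s : Int) ∧ (s : Int) < hi
    · rw [if_pos h1, ih]
      have hd : lo.toNat - s = 0 := by omega
      have hd' : lo.toNat - (s + 1) = 0 := by omega
      have hm : max lo.toNat s = s := by omega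
      have hm' : max lo.toNat (s + 1) = s + 1 := by omega
      have ht : hi.toNat - s = (hi.toNat - (s + 1)) + 1 := by omega
      rw [hd, hd', hm, hm', ht, List.drop_zero, List.drop_zero, List.take_succ_cons,
        List.foldl_cons]
    · rw [if_neg h1, ih]
      by_cases h2 : (s : Int) < lo
      · have hd : lo.toNat - s = (lo.toNat - (s + 1)) + 1 := by omega
        have hm : max lo.toNat s = lo.toNat := by omega
        have hm' : max lo.toNat (s + 1) = lo.toNat := by omega
        rw [hd, hm, hm', List.drop_succ_cons]
      · -- hi ≤ s: both segments are empty
        have ht : hi.toNat - max lo.toNat s = 0 := by omega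
        have ht' : hi.toNat - max lo.toNat (s + 1) = 0 := by omega
        rw [ht, ht']; simp

-- A's range-and-index fold is a fold over the same drop/take segment
theorem foldl_pyRange_getD {α β : Type} (f : β → α → β) (d : α) (xs : List α) :
    ∀ (fuel : Nat) (a b : Int), (b - a).toNat = fuel → 0 ≤ a → b ≤ xs.length →
    ∀ (init : β),
    (PySem.List.pyRange a b 1).foldl (fun acc j => f acc (PySem.List.pyGetD xs j d)) init
      = ((xs.drop a.toNat).take (b.toNat - a.toNat)).foldl f init := by
  intro fuel
  induction fuel with
  | zero =>
    intro a b hf ha hb init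
    have hba : b ≤ a := by omega
    rw [PySem.List.pyRange_one_eq_nil hba]
    have h0 : b.toNat - a.toNat = 0 := by omega
    rw [h0, List.take_zero, List.foldl_nil, List.foldl_nil]
  | succ k ih =>
    intro a b hf ha hb init
    have hab : a < b := by omega
    rw [PySem.List.pyRange_one_cons hab]
    simp only [List.foldl_cons]
    rw [PySem.List.pyGetD_eq_getElem xs d ha (by omega)]
    rw [ih (a + 1) b (by omega) (by omega) hb]
    have hlen : a.toNat < xs.length := by omega
    have h2 : b.toNat - a.toNat = (b.toNat - (a.toNat + 1)) + 1 := by omega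
    have h1 : (a + 1).toNat = a.toNat + 1 := by omega
    rw [h2, List.drop_eq_getElem_cons hlen, List.take_succ_cons, List.foldl_cons, h1]

-- the two fold lemmas specialised to their use sites
theorem foldl_enum_filter0 {α β : Type} (g : β → α → β) (lo hi : Int) (hlo : 0 ≤ lo)
    (xs : List α) (acc : β) :
    (PySem.List.enumerate xs 0).foldl
        (fun acc p => if lo ≤ p.1 ∧ p.1 < hi then g acc p.2 else acc) acc
      = ((xs.drop lo.toNat).take (hi.toNat - lo.toNat)).foldl g acc := by
  have h := foldl_enum_filter g lo hi hlo xs 0 acc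
  simpa using h

theorem foldl_pyRange_getD' {α β : Type} (f : β → α → β) (d : α) (xs : List α)
    (a b : Int) (ha : 0 ≤ a) (hb : b ≤ xs.length) (init : β) :
    (PySem.List.pyRange a b 1).foldl (fun acc j => f acc (PySem.List.pyGetD xs j d)) init
      = ((xs.drop a.toNat).take (b.toNat - a.toNat)).foldl f init :=
  foldl_pyRange_getD f d xs (b - a).toNat a b rfl ha hb init

-- one tallyV pass over a bare row adds the four counts
theorem tally_row (l : List Int) : ∀ (a b c d : Int),
    l.foldl tallyV [a, b, c, d] =
      [a + (l.count 1 : Nat), b + (l.count 2 : Nat), c + (l.count 3 : Nat), d + (l.count 4 : Nat)] := by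
  induction l with
  | nil => intro a b c d; simp [List.foldl]
  | cons v t ih =>
    intro a b c d
    simp only [List.foldl, List.count_cons]
    by_cases h : 1 ≤ v ∧ v ≤ 4
    · have hv : v = 1 ∨ v = 2 ∨ v = 3 ∨ v = 4 := by omega
      rcases hv with h1 | h1 | h1 | h1 <;> subst h1 <;>
        simp [tallyV, ih] <;> ring
    · have h1 : ¬ v = 1 := by omega
      have h2 : ¬ v = 2 := by omega
      have h3 : ¬ v = 3 := by omega
      have h4 : ¬ v = 4 := by omega
      simp [tallyV, h, ih, h1, h2, h3, h4]

-- B's inner fold over one enumerated row adds the four counts of the sliced row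
theorem inner_row (loC hiC : Int) (hlo : 0 ≤ loC) (hhi : 0 ≤ hiC) (row : List Int)
    (a b c d : Int) :
    (PySem.List.enumerate row 0).foldl (el_calc_alt_cell loC hiC) [a, b, c, d]
      = [a + ((PySem.List.slice row (some loC) (some hiC)).count 1 : Nat),
         b + ((PySem.List.slice row (some loC) (some hiC)).count 2 : Nat),
         c + ((PySem.List.slice row (some loC) (some hiC)).count 3 : Nat),
         d + ((PySem.List.slice row (some loC) (some hiC)).count 4 : Nat)] := by
  have hcell : el_calc_alt_cell loC hiC =
      (fun cal p => if loC ≤ p.1 ∧ p.1 < hiC then tallyV cal p.2 else cal) := by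
    funext cal jv; exact cell_eq loC hiC cal jv
  rw [hcell, foldl_enum_filter0 tallyV loC hiC hlo row]
  rw [tally_row, PySem.List.slice_toNat row hlo hhi]

-- over the same row list, B's per-row tally fold equals A's per-row tuple fold
theorem bridge (loC hiC : Int) (hlo : 0 ≤ loC) (hhi : 0 ≤ hiC) (rows : List (List Int)) :
    ∀ (a b c d : Int),
    rows.foldl (fun cal row =>
        (PySem.List.enumerate row (0 : Int)).foldl (el_calc_alt_cell loC hiC) cal) [a, b, c, d]
      = (fun t : Int × Int × Int × Int => [t.1, t.2.1, t.2.2.1, t.2.2.2])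
          (rows.foldl (el_calc_row loC hiC) (a, b, c, d)) := by
  induction rows with
  | nil => intro a b c d; rfl
  | cons row t ih =>
    intro a b c d
    simp only [List.foldl_cons]
    rw [inner_row loC hiC hlo hhi row, ih]
    rfl

-- ===== VERDICT (by name: the statement is the Claim_ definition above) =====
theorem el_calc_spec : Claim_equal_el_calc := by
  intro area side1 side2 _
  unfold Spec_el_calc
  by_cases harea : area = []
  · subst harea
    by_cases h1 : side1 == 0 <;> by_cases h2 : side2 == 0 <;>
      simp [el_calc, el_calc_alt, h1, h2, PySem.List.pyRange_one_eq_nil,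
        PySem.List.enumerate_nil]
  · have hn : 1 ≤ (area.length : Int) := by
      cases area with
      | nil => exact absurd rfl harea
      | cons x t => simp
    unfold el_calc el_calc_alt
    by_cases h1 : side1 == 0 <;> by_cases h2 : side2 == 0 <;>
      simp only [h1, h2, if_true, if_false, Bool.false_eq_true, zero_add]
    · rw [foldl_pyRange_getD' (el_calc_row 1 (area.length : Int)) [] area 1 (area.length : Int)
          (by omega) (by omega),
        foldl_enum_filter0
          (fun cal row => (PySem.List.enumerate row).foldl
            (el_calc_alt_cell 1 (area.length : Int)) cal)
          1 (area.length : Int) (by omega) area [0, 0, 0, 0],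
        bridge 1 (area.length : Int) (by omega) (by omega)]
    · rw [foldl_pyRange_getD' (el_calc_row 1 (area.length : Int)) [] area 0
          ((area.length : Int) - 1) (by omega) (by omega),
        foldl_enum_filter0
          (fun cal row => (PySem.List.enumerate row).foldl
            (el_calc_alt_cell 1 (area.length : Int)) cal)
          0 ((area.length : Int) - 1) (by omega) area [0, 0, 0, 0],
        bridge 1 (area.length : Int) (by omega) (by omega)]
    · rw [foldl_pyRange_getD' (el_calc_row 0 ((area.length : Int) - 1)) [] area 1
          (area.length : Int) (by omega) (by omega),
        foldl_enum_filter0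
          (fun cal row => (PySem.List.enumerate row).foldl
            (el_calc_alt_cell 0 ((area.length : Int) - 1)) cal)
          1 (area.length : Int) (by omega) area [0, 0, 0, 0],
        bridge 0 ((area.length : Int) - 1) (by omega) (by omega)]
    · rw [foldl_pyRange_getD' (el_calc_row 0 ((area.length : Int) - 1)) [] area 0
          ((area.length : Int) - 1) (by omega) (by omega),
        foldl_enum_filter0
          (fun cal row => (PySem.List.enumerate row).foldl
            (el_calc_alt_cell 0 ((area.length : Int) - 1)) cal)
          0 ((area.length : Int) - 1) (by omega) area [0, 0, 0, 0],
        bridge 0 ((area.length : Int) - 1) (by omega) (by omega)]
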